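-- pv_equiv track=rewrite | github.com/Zeus097/HakerRankTasks | task_13_string_validators/string_validators.py | string_validator
-- ===== SOURCE A (Python) =====
-- def alphanumeric_validator(string):
--     has_alphanumeric_characters = False
--
--     for char in string:
--         if char.isalnum():
--             has_alphanumeric_characters = True
--             break
--
--     return has_alphanumeric_characters
--
-- def alphabetical_validator(string):
--     has_alphabetical_characters = False
--
--     for letter in string:
--         if letter.isalpha():
--             has_alphabetical_characters = True
--             break
--
--     return has_alphabetical_characters
--
-- def digits_validator(string):
--     has_digit_characters = False
--
--     for digit in string:
--         if digit.isdigit():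
--             has_digit_characters = True
--             break
--
--     return has_digit_characters
--
-- def lowercase_validator(string):
--     has_lowercase_characters = False
--
--     for char in string:
--         if char.islower():
--             has_lowercase_characters = True
--             break
--
--     return has_lowercase_characters
--
-- def uppercase_validator(string):
--     has_uppercase_characters = False
--
--     for char in string:
--         if char.isupper():
--             has_uppercase_characters = True
--             break
--
--     return has_uppercase_characters
--
-- def string_validator(string):
--     validators_result = [
--         alphanumeric_validator(string),
--         alphabetical_validator(string),
--         digits_validator(string),
--         lowercase_validator(string),
--         uppercase_validator(string),
--     ]
--
--     return "\n".join(str(x) for x in validators_result)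
-- ===== SOURCE B (Python) =====
-- def string_validator(string):
--     alnum = alpha = digit = lower = upper = False
--     for c in string:
--         alnum = alnum or c.isalnum()
--         alpha = alpha or c.isalpha()
--         digit = digit or c.isdigit()
--         lower = lower or c.islower()
--         upper = upper or c.isupper()
--         if alnum and alpha and digit and lower and upper:
--             break
--     return "\n".join(str(x) for x in (alnum, alpha, digit, lower, upper))
-- ===== Notes on version B (the rewrite author's own statement) =====
-- stated objective: alternative
-- what changed: Replaces five separate early-break scans (one per predicate) with a single pass maintaining five boolean flags, breaking once all are set.
import Mathlib
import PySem

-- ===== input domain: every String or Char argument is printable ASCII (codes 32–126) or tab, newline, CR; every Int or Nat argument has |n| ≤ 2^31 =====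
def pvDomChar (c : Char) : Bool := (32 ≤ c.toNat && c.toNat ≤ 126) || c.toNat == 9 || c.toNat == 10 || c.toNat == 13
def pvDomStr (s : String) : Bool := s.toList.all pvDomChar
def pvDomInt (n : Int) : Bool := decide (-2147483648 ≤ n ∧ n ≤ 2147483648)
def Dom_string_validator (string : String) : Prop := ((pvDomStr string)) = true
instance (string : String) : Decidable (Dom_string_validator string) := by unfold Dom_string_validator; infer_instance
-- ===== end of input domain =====

-- B replaces A's five separate early-break scans with one pass keeping five flags; return value only.

-- ===== PORT A =====
-- each helper: loop with early break, literal transliteration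
def alphanumeric_validator_loop : List Char → Bool
  | [] => false
  | c :: rest => if PySem.Chars.isalnum c then true else alphanumeric_validator_loop rest

def alphanumeric_validator (string : String) : Bool :=
  alphanumeric_validator_loop string.toList

def alphabetical_validator_loop : List Char → Bool
  | [] => false
  | c :: rest => if PySem.Chars.isalpha c then true else alphabetical_validator_loop rest

def alphabetical_validator (string : String) : Bool :=
  alphabetical_validator_loop string.toList

def digits_validator_loop : List Char → Bool
  | [] => false
  | c :: rest => if PySem.Chars.isdigit c then true else digits_validator_loop rest

def digits_validator (string : String) : Bool :=
  digits_validator_loop string.toList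

def lowercase_validator_loop : List Char → Bool
  | [] => false
  | c :: rest => if PySem.Chars.islower c then true else lowercase_validator_loop rest

def lowercase_validator (string : String) : Bool :=
  lowercase_validator_loop string.toList

def uppercase_validator_loop : List Char → Bool
  | [] => false
  | c :: rest => if PySem.Chars.isupper c then true else uppercase_validator_loop rest

def uppercase_validator (string : String) : Bool :=
  uppercase_validator_loop string.toList

def pyBoolStr (b : Bool) : String := if b then "True" else "False"

def string_validator (string : String) : String :=
  let validators_result : List Bool :=
    [ alphanumeric_validator string,
      alphabetical_validator string,
      digits_validator string,
      lowercase_validator string,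
      uppercase_validator string ]
  String.intercalate "\n" (validators_result.map pyBoolStr)

-- ===== PORT B =====
-- single pass with five flags, early break when all set
def string_validator_alt_loop : List Char → Bool → Bool → Bool → Bool → Bool → Bool × Bool × Bool × Bool × Bool
  | [], an, al, di, lo, up => (an, al, di, lo, up)
  | c :: rest, an, al, di, lo, up =>
    let an := an || PySem.Chars.isalnum c
    let al := al || PySem.Chars.isalpha c
    let di := di || PySem.Chars.isdigit c
    let lo := lo || PySem.Chars.islower c
    let up := up || PySem.Chars.isupper c
    if an && al && di && lo && up then (an, al, di, lo, up)
    else string_validator_alt_loop rest an al di lo up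

def string_validator_alt (string : String) : String :=
  let r := string_validator_alt_loop string.toList false false false false false
  String.intercalate "\n"
    ([r.1, r.2.1, r.2.2.1, r.2.2.2.1, r.2.2.2.2].map (fun b => if b then "True" else "False"))

-- ===== PRECONDITION & SPEC =====
def Spec_string_validator (string : String) (out : String) : Prop := out = string_validator_alt string
instance (string : String) (out : String) : Decidable (Spec_string_validator string out) := by unfold Spec_string_validator; infer_instance

-- ===== CLAIM (what is proved, stated in full; the proofs are below) =====
def Claim_equal_string_validator : Prop := ∀ (string : String), Dom_string_validator string → Spec_string_validator string (string_validator string)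

-- ===== LEMMAS AND PROOFS =====
theorem alnum_loop_eq (l : List Char) : alphanumeric_validator_loop l = l.any PySem.Chars.isalnum := by
  induction l with
  | nil => rfl
  | cons c r ih => simp [alphanumeric_validator_loop, ih]

theorem alpha_loop_eq (l : List Char) : alphabetical_validator_loop l = l.any PySem.Chars.isalpha := by
  induction l with
  | nil => rfl
  | cons c r ih => simp [alphabetical_validator_loop, ih]

theorem digit_loop_eq (l : List Char) : digits_validator_loop l = l.any PySem.Chars.isdigit := by
  induction l with
  | nil => rfl
  | cons c r ih => simp [digits_validator_loop, ih]

theorem lower_loop_eq (l : List Char) : lowercase_validator_loop l = l.any PySem.Chars.islower := by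
  induction l with
  | nil => rfl
  | cons c r ih => simp [lowercase_validator_loop, ih]

theorem upper_loop_eq (l : List Char) : uppercase_validator_loop l = l.any PySem.Chars.isupper := by
  induction l with
  | nil => rfl
  | cons c r ih => simp [uppercase_validator_loop, ih]

theorem alt_loop_eq (l : List Char) : ∀ an al di lo up,
    string_validator_alt_loop l an al di lo up =
      (an || l.any PySem.Chars.isalnum, al || l.any PySem.Chars.isalpha,
       di || l.any PySem.Chars.isdigit, lo || l.any PySem.Chars.islower,
       up || l.any PySem.Chars.isupper) := by
  induction l with
  | nil => intro an al di lo up; simp [string_validator_alt_loop]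
  | cons c r ih =>
    intro an al di lo up
    simp only [string_validator_alt_loop]
    split
    · next h =>
      simp only [Bool.and_eq_true] at h
      obtain ⟨⟨⟨⟨h1, h2⟩, h3⟩, h4⟩, h5⟩ := h
      simp [List.any_cons, h1, h2, h3, h4, h5, ← Bool.or_assoc]
    · rw [ih]
      simp [List.any_cons, Bool.or_assoc]

-- ===== VERDICT (by name: the statement is the Claim_ definition above) =====
theorem string_validator_spec : Claim_equal_string_validator := by
  intro s _
  show string_validator s = string_validator_alt s
  simp [string_validator, string_validator_alt, alt_loop_eq,
        alphanumeric_validator, alphabetical_validator, digits_validator,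
        lowercase_validator, uppercase_validator,
        alnum_loop_eq, alpha_loop_eq, digit_loop_eq, lower_loop_eq, upper_loop_eq, pyBoolStr]
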